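-- pv_equiv track=rewrite | github.com/bzier/gym-mupen64plus | gym_mupen64plus/envs/MarioKart64/mario_kart_env.py | _generate_checkpoints
-- ===== SOURCE A (Python) =====
-- def _generate_checkpoints(min_x, min_y, max_x, max_y):
--     # TODO: I'm sure this can/should be more pythonic somehow
--
--     # Sample 4 pixels for each checkpoint to reduce the
--     # likelihood of a pixel matching the color by chance
--
--     # Top
--     for i in range((max_x - min_x) // 2):
--         x_val = min_x + i*2
--         y_val = min_y
--         yield [(x_val, y_val), (x_val + 1, y_val), (x_val, y_val + 1), (x_val + 1, y_val + 1)]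
--
--     # Right-side
--     for i in range((max_y - min_y) // 2):
--         x_val = max_x
--         y_val = min_y + i*2
--         yield [(x_val, y_val), (x_val + 1, y_val), (x_val, y_val + 1), (x_val + 1, y_val + 1)]
--
--     # Bottom
--     for i in range((max_x - min_x) // 2):
--         if i == 0: # Skip the bottom right corner (for some reason MK doesn't draw it)
--             continue
--         x_val = max_x - i*2
--         y_val = max_y
--         yield [(x_val, y_val), (x_val + 1, y_val), (x_val, y_val + 1), (x_val + 1, y_val + 1)]
--
--     # Left-side
--     for i in range((max_y - min_y) // 2):
--         x_val = min_x
--         y_val = max_y - i*2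
--         yield [(x_val, y_val), (x_val + 1, y_val), (x_val, y_val + 1), (x_val + 1, y_val + 1)]
-- ===== SOURCE B (Python) =====
-- def _generate_checkpoints(min_x, min_y, max_x, max_y):
--     # One loop over a single global index: each index k is decoded arithmetically
--     # into its anchor point on the border (top / right / bottom-without-corner / left).
--     w = (max_x - min_x) // 2
--     h = (max_y - min_y) // 2
--     top = max(w, 0)
--     side = max(h, 0)
--     bottom = max(w - 1, 0)
--     total = top + side + bottom + side
--     for k in range(total):
--         if k < top:
--             x, y = min_x + 2 * k, min_y
--         elif k < top + side:
--             x, y = max_x, min_y + 2 * (k - top)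
--         elif k < top + side + bottom:
--             x, y = max_x - 2 * (k - top - side + 1), max_y
--         else:
--             x, y = min_x, max_y - 2 * (k - top - side - bottom)
--         yield [(x, y), (x + 1, y), (x, y + 1), (x + 1, y + 1)]
-- ===== Notes on version B (the rewrite author's own statement) =====
-- stated objective: alternative
-- what changed: B replaces A's four separate edge-walk loops (with an inline continue guard) by one loop over a single global checkpoint index range, decoding each index k arithmetically into its border anchor point; the bottom-right-corner skip becomes a segment-length computation (max(w-1,0)) instead of a skipped iteration.
import Mathlib
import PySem

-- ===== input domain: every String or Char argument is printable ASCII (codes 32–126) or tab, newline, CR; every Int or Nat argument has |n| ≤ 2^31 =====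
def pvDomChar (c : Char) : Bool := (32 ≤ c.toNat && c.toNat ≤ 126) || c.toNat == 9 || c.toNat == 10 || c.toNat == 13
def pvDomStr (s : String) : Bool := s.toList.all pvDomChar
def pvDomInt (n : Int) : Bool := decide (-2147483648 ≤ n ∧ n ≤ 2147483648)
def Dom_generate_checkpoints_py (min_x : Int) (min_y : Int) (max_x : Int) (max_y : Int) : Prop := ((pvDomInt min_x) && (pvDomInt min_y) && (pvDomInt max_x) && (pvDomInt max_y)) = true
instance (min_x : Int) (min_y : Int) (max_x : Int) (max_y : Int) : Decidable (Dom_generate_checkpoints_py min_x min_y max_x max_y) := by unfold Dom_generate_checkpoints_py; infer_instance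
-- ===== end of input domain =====

-- B is an alternative decomposition: one loop over a global index, decoded arithmetically.

-- ===== PORT A =====
-- Literal transliteration of A: four side-walk loops, each appending its quad inline;
-- the bottom loop keeps the 'if i == 0: continue' guard.
def generate_checkpoints_py (min_x : Int) (min_y : Int) (max_x : Int) (max_y : Int) : List (List (Int × Int)) :=
  let top := (PySem.List.pyRange 0 (PySem.Int.floordiv (max_x - min_x) 2) 1).foldl
    (fun acc i =>
      let x_val := min_x + i * 2
      let y_val := min_y
      acc ++ [[(x_val, y_val), (x_val + 1, y_val), (x_val, y_val + 1), (x_val + 1, y_val + 1)]]) []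
  let right := (PySem.List.pyRange 0 (PySem.Int.floordiv (max_y - min_y) 2) 1).foldl
    (fun acc i =>
      let x_val := max_x
      let y_val := min_y + i * 2
      acc ++ [[(x_val, y_val), (x_val + 1, y_val), (x_val, y_val + 1), (x_val + 1, y_val + 1)]]) []
  let bottom := (PySem.List.pyRange 0 (PySem.Int.floordiv (max_x - min_x) 2) 1).foldl
    (fun acc i =>
      if i == 0 then acc
      else
        let x_val := max_x - i * 2
        let y_val := max_y
        acc ++ [[(x_val, y_val), (x_val + 1, y_val), (x_val, y_val + 1), (x_val + 1, y_val + 1)]]) []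
  let left := (PySem.List.pyRange 0 (PySem.Int.floordiv (max_y - min_y) 2) 1).foldl
    (fun acc i =>
      let x_val := min_x
      let y_val := max_y - i * 2
      acc ++ [[(x_val, y_val), (x_val + 1, y_val), (x_val, y_val + 1), (x_val + 1, y_val + 1)]]) []
  top ++ right ++ bottom ++ left

-- ===== PORT B =====
-- B: decode a single global checkpoint index k into its border anchor point.
def pvDecode (min_x min_y max_x max_y top side bottom : Int) (k : Int) : Int × Int :=
  if k < top then (min_x + 2 * k, min_y)
  else if k < top + side then (max_x, min_y + 2 * (k - top))
  else if k < top + side + bottom then (max_x - 2 * (k - top - side + 1), max_y)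
  else (min_x, max_y - 2 * (k - top - side - bottom))

def generate_checkpoints_py_alt (min_x : Int) (min_y : Int) (max_x : Int) (max_y : Int) : List (List (Int × Int)) :=
  let w := PySem.Int.floordiv (max_x - min_x) 2
  let h := PySem.Int.floordiv (max_y - min_y) 2
  let top := max w 0
  let side := max h 0
  let bottom := max (w - 1) 0
  let total := top + side + bottom + side
  (PySem.List.pyRange 0 total 1).map (fun k =>
    let p := pvDecode min_x min_y max_x max_y top side bottom k
    [(p.1, p.2), (p.1 + 1, p.2), (p.1, p.2 + 1), (p.1 + 1, p.2 + 1)])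

-- ===== PRECONDITION & SPEC =====
def Spec_generate_checkpoints_py (min_x : Int) (min_y : Int) (max_x : Int) (max_y : Int) (out : List (List (Int × Int))) : Prop := out = generate_checkpoints_py_alt min_x min_y max_x max_y
instance (min_x : Int) (min_y : Int) (max_x : Int) (max_y : Int) (out : List (List (Int × Int))) : Decidable (Spec_generate_checkpoints_py min_x min_y max_x max_y out) := by unfold Spec_generate_checkpoints_py; infer_instance

-- ===== CLAIM =====
def Claim_equal_generate_checkpoints_py : Prop := ∀ (min_x : Int) (min_y : Int) (max_x : Int) (max_y : Int), Dom_generate_checkpoints_py min_x min_y max_x max_y → Spec_generate_checkpoints_py min_x min_y max_x max_y (generate_checkpoints_py min_x min_y max_x max_y)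

-- ===== LEMMAS AND PROOFS =====
-- A's bottom loop ('if i == 0: continue') is the branch-swapped form of an append-if fold.
theorem pv_fold_skip_zero (f : Int → List (Int × Int)) (acc : List (List (Int × Int)))
    (l : List Int) :
    l.foldl (fun acc i => if i == 0 then acc else acc ++ [f i]) acc
      = acc ++ (l.filter (fun i => !(i == 0))).map f := by
  rw [show (fun (acc : List (List (Int × Int))) (i : Int) => if i == 0 then acc else acc ++ [f i])
      = (fun acc i => if (!(i == 0)) then acc ++ [f i] else acc) from by
    funext acc i; by_cases h : i = 0 <;> simp [h]]
  exact PySem.List.foldl_append_if _ _ _ _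

-- Skipping i = 0 in range(0, w) leaves exactly range(1, w).
theorem pv_bottom_filter (w : Int) :
    (PySem.List.pyRange 0 w 1).filter (fun i => !(i == 0)) = PySem.List.pyRange 1 w 1 := by
  by_cases h : w ≤ 0
  · rw [PySem.List.pyRange_one_eq_nil h, PySem.List.pyRange_one_eq_nil (by omega : w ≤ 1)]
    rfl
  · rw [PySem.List.pyRange_one_cons (by omega : (0:Int) < w),
      List.filter_cons_of_neg (by simp)]
    exact List.filter_eq_self.mpr (fun x hx => by
      have hm := (PySem.List.mem_pyRange_one (a := 1) (b := w) (x := x)).mp hx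
      have hx0 : x ≠ 0 := by omega
      simpa using hx0)

-- ===== VERDICT =====
theorem generate_checkpoints_py_spec : Claim_equal_generate_checkpoints_py := by
  intro min_x min_y max_x max_y _
  unfold Spec_generate_checkpoints_py generate_checkpoints_py generate_checkpoints_py_alt
  set w := PySem.Int.floordiv (max_x - min_x) 2 with hw
  set h := PySem.Int.floordiv (max_y - min_y) 2 with hh
  set t1 := max w 0 with ht1
  set t2 := max h 0 with ht2
  set t3 := max (w - 1) 0 with ht3
  simp only [PySem.List.foldl_append_singleton_eq_map, pv_fold_skip_zero, pv_bottom_filter,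
    List.nil_append]
  rw [PySem.List.pyRange_one_append 0 t1 (t1 + t2 + t3 + t2) (by omega) (by omega),
      PySem.List.pyRange_one_append t1 (t1 + t2) (t1 + t2 + t3 + t2) (by omega) (by omega),
      PySem.List.pyRange_one_append (t1 + t2) (t1 + t2 + t3) (t1 + t2 + t3 + t2) (by omega) (by omega)]
  simp only [List.map_append, List.append_assoc]
  refine congrArg₂ _ ?_ (congrArg₂ _ ?_ (congrArg₂ _ ?_ ?_)) <;>
    simp only [PySem.List.pyRange_one, List.map_map]
  · rw [show (t1 - 0).toNat = (w - 0).toNat from by omega]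
    refine List.map_congr_left (fun k hk => ?_)
    have hk' : (k : Int) < t1 := by have := List.mem_range.mp hk; omega
    have hd : pvDecode min_x min_y max_x max_y (max w 0) (max h 0) (max (w - 1) 0) (0 + (k : Int))
        = (min_x + (0 + (k : Int)) * 2, min_y) := by
      simp only [pvDecode]
      rw [if_pos (by omega : (0 : Int) + (k : Int) < t1)]
      exact Prod.ext (by ring) rfl
    simp only [Function.comp_apply, hd]
  · rw [show (t1 + t2 - t1).toNat = (h - 0).toNat from by omega]
    refine List.map_congr_left (fun k hk => ?_)
    have hk' : (k : Int) < t2 := by have := List.mem_range.mp hk; omega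
    have hd : pvDecode min_x min_y max_x max_y (max w 0) (max h 0) (max (w - 1) 0) (t1 + (k : Int))
        = (max_x, min_y + (0 + (k : Int)) * 2) := by
      simp only [pvDecode]
      rw [if_neg (by omega : ¬ t1 + (k : Int) < t1),
          if_pos (by omega : t1 + (k : Int) < t1 + t2)]
      exact Prod.ext rfl (by ring)
    simp only [Function.comp_apply, hd]
  · rw [show (t1 + t2 + t3 - (t1 + t2)).toNat = (w - 1).toNat from by omega]
    refine List.map_congr_left (fun k hk => ?_)
    have hk' : (k : Int) < t3 := by have := List.mem_range.mp hk; omega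
    have hd : pvDecode min_x min_y max_x max_y (max w 0) (max h 0) (max (w - 1) 0) (t1 + t2 + (k : Int))
        = (max_x - (1 + (k : Int)) * 2, max_y) := by
      simp only [pvDecode]
      rw [if_neg (by omega : ¬ t1 + t2 + (k : Int) < t1),
          if_neg (by omega : ¬ t1 + t2 + (k : Int) < t1 + t2),
          if_pos (by omega : t1 + t2 + (k : Int) < t1 + t2 + t3)]
      exact Prod.ext (by ring) rfl
    simp only [Function.comp_apply, hd]
  · rw [show (t1 + t2 + t3 + t2 - (t1 + t2 + t3)).toNat = (h - 0).toNat from by omega]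
    refine List.map_congr_left (fun k hk => ?_)
    have hk' : (k : Int) < t2 := by have := List.mem_range.mp hk; omega
    have hd : pvDecode min_x min_y max_x max_y (max w 0) (max h 0) (max (w - 1) 0) (t1 + t2 + t3 + (k : Int))
        = (min_x, max_y - (0 + (k : Int)) * 2) := by
      simp only [pvDecode]
      rw [if_neg (by omega : ¬ t1 + t2 + t3 + (k : Int) < t1),
          if_neg (by omega : ¬ t1 + t2 + t3 + (k : Int) < t1 + t2),
          if_neg (by omega : ¬ t1 + t2 + t3 + (k : Int) < t1 + t2 + t3)]
      exact Prod.ext rfl (by ring)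
    simp only [Function.comp_apply, hd]
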